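-- pv_equiv track=rewrite | github.com/texxensolution/wrp_read_ai | src/common/worker.py | calculate_queued_task_display
-- ===== SOURCE A (Python) =====
-- def calculate_queued_task_display(queue_length: int):
--     """return the number of applicant queue"""
--     human_queue_str = ""
--     for i in range(queue_length):
--         if i % 2 == 0:
--             human_queue_str += "🚶‍♂️"
--         else:
--             human_queue_str += "🚶‍♀️"
--     return human_queue_str + " current applicants waiting at the queue: " + str(queue_length)
-- ===== SOURCE B (Python) =====
-- def calculate_queued_task_display(queue_length: int):
--     """return the number of applicant queue"""
--     n = max(queue_length, 0)
--     emojis = "🚶‍♂️🚶‍♀️" * (n // 2) + "🚶‍♂️" * (n % 2)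
--     return emojis + " current applicants waiting at the queue: " + str(queue_length)
-- ===== Notes on version B (the rewrite author's own statement) =====
-- stated objective: faster
-- what changed: Replaces the per-index loop with its alternating branch by direct block construction: repeat the two-emoji pair half the clamped length, then append the leftover single emoji when the clamped length is odd.
import Mathlib
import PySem

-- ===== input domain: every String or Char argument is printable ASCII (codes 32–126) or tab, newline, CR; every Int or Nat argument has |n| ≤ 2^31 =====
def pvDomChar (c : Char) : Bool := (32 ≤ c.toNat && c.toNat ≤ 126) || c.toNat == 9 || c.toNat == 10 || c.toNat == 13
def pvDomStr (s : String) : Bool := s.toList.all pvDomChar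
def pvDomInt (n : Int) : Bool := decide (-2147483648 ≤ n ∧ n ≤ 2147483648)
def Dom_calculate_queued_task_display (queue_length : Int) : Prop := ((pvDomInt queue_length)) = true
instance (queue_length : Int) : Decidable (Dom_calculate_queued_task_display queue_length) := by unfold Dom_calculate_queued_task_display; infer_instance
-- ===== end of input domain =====

-- B builds the emoji block by repeating the two-emoji pair n//2 times (plus the n%2 leftover)
-- instead of A's per-index loop with an alternating branch; objective: idiomatic.

-- ===== PORT A =====
def calculate_queued_task_display (queue_length : Int) : String :=
  let human_queue_str :=
    (PySem.List.pyRange 0 queue_length 1).foldl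
      (fun acc i => if PySem.Int.mod i 2 == 0 then acc ++ "🚶‍♂️" else acc ++ "🚶‍♀️") ""
  human_queue_str ++ " current applicants waiting at the queue: " ++ PySem.Int.toStr queue_length

-- ===== PORT B =====
-- Python's 's * k' for k ≥ 0 (here k is n//2 or n%2 with n = max(queue_length,0) ≥ 0)
def pvStrRepeat (s : String) : Nat → String
  | 0 => ""
  | Nat.succ k => pvStrRepeat s k ++ s

def calculate_queued_task_display_alt (queue_length : Int) : String :=
  let n := (max queue_length 0).toNat
  let emojis := pvStrRepeat "🚶‍♂️🚶‍♀️" (n / 2) ++ pvStrRepeat "🚶‍♂️" (n % 2)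
  emojis ++ " current applicants waiting at the queue: " ++ PySem.Int.toStr queue_length

-- ===== PRECONDITION & SPEC =====
def Spec_calculate_queued_task_display (queue_length : Int) (out : String) : Prop := out = calculate_queued_task_display_alt queue_length
instance (queue_length : Int) (out : String) : Decidable (Spec_calculate_queued_task_display queue_length out) := by unfold Spec_calculate_queued_task_display; infer_instance

-- ===== CLAIM (what is proved, stated in full; the proofs are below) =====
def Claim_equal_calculate_queued_task_display : Prop := ∀ (queue_length : Int), Dom_calculate_queued_task_display queue_length → Spec_calculate_queued_task_display queue_length (calculate_queued_task_display queue_length)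

-- ===== LEMMAS AND PROOFS =====

lemma pair_split : ("🚶‍♂️🚶‍♀️" : String) = "🚶‍♂️" ++ "🚶‍♀️" := by decide

lemma loop_eq (m : Nat) :
    (PySem.List.pyRange 0 (m : Int) 1).foldl
      (fun acc i => if PySem.Int.mod i 2 == 0 then acc ++ "🚶‍♂️" else acc ++ "🚶‍♀️") ""
    = pvStrRepeat "🚶‍♂️🚶‍♀️" (m / 2) ++ pvStrRepeat "🚶‍♂️" (m % 2) := by
  induction m with
  | zero => simp [pvStrRepeat]
  | succ m ih =>
    have h : ((m : Int) + 1) = ((m + 1 : Nat) : Int) := by push_cast; ring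
    rw [← h, PySem.List.pyRange_one_succ_right (by positivity), List.foldl_append, ih]
    simp only [List.foldl]
    have hmod : PySem.Int.mod (m : Int) 2 = ((m % 2 : Nat) : Int) := by
      simp [PySem.Int.mod]
      rw [Int.fmod_eq_emod]
      omega
    rcases Nat.even_or_odd m with he | ho
    · have h2 : m % 2 = 0 := Nat.even_iff.mp he
      have : (m + 1) / 2 = m / 2 ∧ (m + 1) % 2 = 1 := by omega
      rw [hmod, h2, this.1, this.2]
      simp [pvStrRepeat]
    · have h2 : m % 2 = 1 := Nat.odd_iff.mp ho
      have : (m + 1) / 2 = m / 2 + 1 ∧ (m + 1) % 2 = 0 := by omega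
      rw [hmod, h2, this.1, this.2]
      simp [pvStrRepeat, pair_split, String.append_assoc]

-- ===== VERDICT (by name: the statement is the Claim_ definition above) =====
theorem calculate_queued_task_display_spec : Claim_equal_calculate_queued_task_display := by
  intro q _
  unfold Spec_calculate_queued_task_display calculate_queued_task_display calculate_queued_task_display_alt
  by_cases hq : q ≤ 0
  · rw [PySem.List.pyRange_one_eq_nil hq]
    have : (max q 0).toNat = 0 := by omega
    simp [this, pvStrRepeat]
  · have h : q = ((q.toNat : Nat) : Int) := by omega
    have hmax : (max q 0).toNat = q.toNat := by omega
    rw [hmax]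
    conv_lhs => rw [h]
    rw [loop_eq, ← h]
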